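-- pv_equiv track=rewrite | github.com/diegosramirez/bmad-orchestrator | src/bmad_orchestrator/nodes/create_story_tasks.py | _parse_acceptance_criteria
-- ===== SOURCE A (Python) =====
-- def _parse_acceptance_criteria(description: str) -> list[str]:
--     """Extract acceptance criteria from a Jira story description.
--
--     The orchestrator stores AC in the format:
--         **Acceptance Criteria:**
--         - criterion 1
--         - criterion 2
--     """
--     marker = "**Acceptance Criteria:**"
--     idx = description.find(marker)
--     if idx == -1:
--         return []
--     after = description[idx + len(marker) :]
--     criteria = []
--     for line in after.splitlines():
--         stripped = line.strip()
--         if stripped.startswith("- "):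
--             criteria.append(stripped[2:])
--         elif stripped and criteria:
--             # Non-bullet line after we started collecting → stop
--             break
--     return criteria
-- ===== SOURCE B (Python) =====
-- def _drop_prose(lines):
--     """Drop leading lines (blanks and prose) up to the first bullet."""
--     for k, s in enumerate(lines):
--         if s.startswith("- "):
--             return lines[k:]
--     return []
--
--
-- def _take_block(lines):
--     """Keep the initial run of blank-or-bullet lines."""
--     for k, s in enumerate(lines):
--         if s and not s.startswith("- "):
--             return lines[:k]
--     return lines
--
--
-- def _parse_acceptance_criteria(description: str) -> list[str]:
--     marker = "**Acceptance Criteria:**"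
--     idx = description.find(marker)
--     if idx == -1:
--         return []
--     stripped = [line.strip() for line in description[idx + len(marker):].splitlines()]
--     block = _take_block(_drop_prose(stripped))
--     return [s[2:] for s in block if s.startswith("- ")]
-- ===== Notes on version B (the rewrite author's own statement) =====
-- stated objective: alternative
-- what changed: Replaces the flag-driven loop with break by a three-phase pipeline over the pre-stripped lines: drop leading non-bullet lines, take the initial blank-or-bullet block, then a comprehension extracting s[2:] from the bullet lines.
import Mathlib
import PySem

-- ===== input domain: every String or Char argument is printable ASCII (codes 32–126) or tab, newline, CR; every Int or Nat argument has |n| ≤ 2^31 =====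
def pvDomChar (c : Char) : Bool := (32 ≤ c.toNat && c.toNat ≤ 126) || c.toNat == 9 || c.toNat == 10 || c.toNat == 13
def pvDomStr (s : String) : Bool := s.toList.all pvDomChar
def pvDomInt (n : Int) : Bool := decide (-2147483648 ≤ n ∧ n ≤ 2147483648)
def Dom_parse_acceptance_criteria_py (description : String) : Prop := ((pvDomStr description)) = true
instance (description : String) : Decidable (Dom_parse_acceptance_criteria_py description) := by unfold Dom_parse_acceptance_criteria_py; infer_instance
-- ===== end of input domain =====

-- B replaces A's flag-driven loop with break by a three-phase pipeline over the pre-stripped lines (drop leading non-bullets, take the blank-or-bullet block, extract) — alternative decomposition, same cost.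

-- ===== PORT A =====
-- A's for-loop with accumulating `criteria` and break, as structural recursion over the lines.
def pvALoop (lines : List String) (criteria : List String) : List String :=
  match lines with
  | [] => criteria
  | line :: rest =>
    let stripped := PySem.Str.strip line
    if PySem.Str.startswith stripped "- " then
      pvALoop rest (criteria ++ [PySem.Str.slice stripped (some 2) none])
    else if stripped ≠ "" ∧ criteria ≠ [] then criteria
    else pvALoop rest criteria

def parse_acceptance_criteria_py (description : String) : List String :=
  let marker := "**Acceptance Criteria:**"
  let idx := PySem.Str.find description marker
  if idx = -1 then []
  else
    let after := PySem.Str.slice description (some (idx + PySem.Str.len marker)) none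
    pvALoop (PySem.Str.splitlines after) []

-- ===== PORT B =====
def pvIsBullet (s : String) : Bool := PySem.Str.startswith s "- "

-- B's `_drop_prose`: drop leading lines up to the first bullet (the for/enumerate scan as structural recursion).
def pvDropProse : List String → List String
  | [] => []
  | s :: rest => if pvIsBullet s then s :: rest else pvDropProse rest

-- B's `_take_block`: keep the initial run of blank-or-bullet lines.
def pvTakeBlock : List String → List String
  | [] => []
  | s :: rest => if s ≠ "" ∧ ¬ pvIsBullet s then [] else s :: pvTakeBlock rest

def parse_acceptance_criteria_py_alt (description : String) : List String :=
  let marker := "**Acceptance Criteria:**"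
  let idx := PySem.Str.find description marker
  if idx = -1 then []
  else
    let after := PySem.Str.slice description (some (idx + PySem.Str.len marker)) none
    let stripped := (PySem.Str.splitlines after).map PySem.Str.strip
    let block := pvTakeBlock (pvDropProse stripped)
    (block.filter pvIsBullet).map (fun s => PySem.Str.slice s (some 2) none)

-- ===== PRECONDITION & SPEC =====
def Spec_parse_acceptance_criteria_py (description : String) (out : List String) : Prop := out = parse_acceptance_criteria_py_alt description
instance (description : String) (out : List String) : Decidable (Spec_parse_acceptance_criteria_py description out) := by unfold Spec_parse_acceptance_criteria_py; infer_instance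

-- ===== CLAIM (what is proved, stated in full; the proofs are below) =====
def Claim_equal_parse_acceptance_criteria_py : Prop := ∀ (description : String), Dom_parse_acceptance_criteria_py description → Spec_parse_acceptance_criteria_py description (parse_acceptance_criteria_py description)

-- ===== LEMMAS AND PROOFS =====

-- Once `criteria` is nonempty, A collects bullets and blanks up to the first other line: the take-block/extract phases.
theorem pvALoop_phase2 (lines : List String) (acc : List String) (hacc : acc ≠ []) :
    pvALoop lines acc =
      acc ++ ((pvTakeBlock (lines.map PySem.Str.strip)).filter pvIsBullet).map
        (fun s => PySem.Str.slice s (some 2) none) := by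
  induction lines generalizing acc with
  | nil => simp [pvALoop, pvTakeBlock]
  | cons line rest ih =>
    simp only [pvALoop, List.map_cons]
    by_cases hb : PySem.Chars.startswith (PySem.Chars.strip line.toList) ['-', ' '] = true
    · rw [if_pos (by simpa using hb), ih _ (by simp)]
      simp [pvTakeBlock, pvIsBullet, hb]
    · rw [if_neg (by simpa using hb)]
      simp only [Bool.not_eq_true] at hb
      by_cases he : PySem.Str.strip line = ""
      · rw [if_neg (by simp [he]), ih _ hacc]
        simp [pvTakeBlock, pvIsBullet, he, (by decide : PySem.Chars.startswith ([] : List Char) ['-', ' '] = false)]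
      · rw [if_pos ⟨he, hacc⟩]
        have he' : PySem.Str.strip line ≠ "" := he
        simp [pvTakeBlock, pvIsBullet, hb, he']

-- The whole loop from an empty accumulator is B's three-phase pipeline.
theorem pvALoop_eq_pipeline (lines : List String) :
    pvALoop lines [] =
      ((pvTakeBlock (pvDropProse (lines.map PySem.Str.strip))).filter pvIsBullet).map
        (fun s => PySem.Str.slice s (some 2) none) := by
  induction lines with
  | nil => simp [pvALoop, pvTakeBlock, pvDropProse]
  | cons line rest ih =>
    simp only [pvALoop, List.map_cons]
    by_cases hb : PySem.Chars.startswith (PySem.Chars.strip line.toList) ['-', ' '] = true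
    · rw [if_pos (by simpa using hb), pvALoop_phase2 _ _ (by simp)]
      simp [pvDropProse, pvTakeBlock, pvIsBullet, hb]
    · rw [if_neg (by simpa using hb), if_neg (by simp), ih]
      simp only [Bool.not_eq_true] at hb
      simp [pvDropProse, pvIsBullet, hb]

-- ===== VERDICT (by name: the statement is the Claim_ definition above) =====
theorem parse_acceptance_criteria_py_spec : Claim_equal_parse_acceptance_criteria_py := by
  intro description _
  unfold Spec_parse_acceptance_criteria_py parse_acceptance_criteria_py parse_acceptance_criteria_py_alt
  by_cases h : PySem.Str.find description "**Acceptance Criteria:**" = -1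
  · rw [if_pos h, if_pos h]
  · rw [if_neg h, if_neg h]
    exact pvALoop_eq_pipeline _
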